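-- pv_equiv track=rewrite | github.com/hachibaka/AOC2018 | Day2/day2.py | findidenticalids
-- ===== SOURCE A (Python) =====
-- def oddchars(s1, s2):
-- 	i = 0
-- 	onechange = False
-- 	oddchars = ""
-- 	oddpos = -1
-- 	while i < len(s1):
-- 		if s1[i] != s2[i]:
-- 			if onechange:
-- 				return ""
-- 			else:
-- 				oddchars = s1[i]+s2[i]
-- 				oddpos = i
-- 				onechange = True
-- 		i += 1
--
-- 	return s1[:oddpos] + s2[oddpos+1:] if oddpos >= 0  else ""
--
-- def findidenticalids(idlist):
-- 	chars = ""
-- 	for i in range(len(idlist)):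
-- 		for j in range(i+1, len(idlist)):
-- 			if len(idlist[i]) != len(idlist[j]):
-- 				continue
-- 			else:
-- 				chars += oddchars(idlist[i], idlist[j])
--
-- 	return chars
-- ===== SOURCE B (Python) =====
-- def findidenticalids(idlist):
--     # Per-position hashing: for each position p, bucket the strings by the string
--     # with position p removed; two IDs differ in exactly one position iff they share
--     # a bucket at that (unique) position.  Collect hits keyed by the pair's loop
--     # rank i*n+j and sort once to reproduce A's pair order.
--     n = len(idlist)
--     maxlen = 0
--     for s in idlist:
--         if len(s) > maxlen:
--             maxlen = len(s)
--     hits = []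
--     for p in range(maxlen):
--         buckets = {}
--         for i, s in enumerate(idlist):
--             if p < len(s):
--                 m = s[:p] + s[p+1:]
--                 prev = buckets.setdefault(m, [])
--                 for j, t in prev:
--                     if t != s:
--                         hits.append((j * n + i, m))
--                 prev.append((i, s))
--     hits.sort(key=lambda h: h[0])
--     return "".join(m for _, m in hits)
-- ===== Notes on version B (the rewrite author's own statement) =====
-- stated objective: faster
-- what changed: Replaces A's all-pairs character-by-character comparison with per-position masked-string hashing: for each position p the IDs are bucketed by the string with position p deleted, so pairs differing in exactly one position are found as bucket collisions, then hits are sorted by the pair rank i*n+j to reproduce A's concatenation order.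
import Mathlib
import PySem

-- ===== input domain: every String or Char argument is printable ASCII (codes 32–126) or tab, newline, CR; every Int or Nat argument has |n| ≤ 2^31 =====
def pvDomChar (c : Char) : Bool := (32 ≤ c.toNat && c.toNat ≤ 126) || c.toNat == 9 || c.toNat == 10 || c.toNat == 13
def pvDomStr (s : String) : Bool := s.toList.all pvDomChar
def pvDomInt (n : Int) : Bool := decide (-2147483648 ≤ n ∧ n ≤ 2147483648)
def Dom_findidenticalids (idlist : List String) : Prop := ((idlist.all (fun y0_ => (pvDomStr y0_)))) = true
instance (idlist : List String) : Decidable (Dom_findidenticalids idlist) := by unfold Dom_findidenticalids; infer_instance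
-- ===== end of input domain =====

-- B replaces A's all-pairs character comparison by per-position masked-string hashing
-- (bucket by the string with position p deleted; bucket collisions are the Hamming-1 pairs),
-- with one final sort by pair rank i*n+j to reproduce A's pair order (objective: faster).

-- ===== PORT A =====
-- the while-loop of oddchars as recursion on i with the same state (onechange, oddchars-string oc, oddpos);
-- strings are handled as List Char per PySem convention; s2[i] is read with getD
-- (every call site passes equal-length strings, so the default is never the value Python would raise on).
def oddcharsGo (s1 s2 : List Char) (i : Nat) (onechange : Bool) (oc : List Char) (oddpos : Int) : List Char :=
  if h : i < s1.length then
    if s1.getD i ' ' ≠ s2.getD i ' ' then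
      if onechange then []
      else oddcharsGo s1 s2 (i+1) true [s1.getD i ' ', s2.getD i ' '] i
    else oddcharsGo s1 s2 (i+1) onechange oc oddpos
  else
    if 0 ≤ oddpos then
      PySem.List.slice s1 none (some oddpos) ++ PySem.List.slice s2 (some (oddpos+1)) none
    else []
termination_by s1.length - i

def findidenticalids (idlist : List String) : String :=
  String.ofList ((PySem.List.pyRange 0 idlist.length 1).foldl (fun chars i =>
    (PySem.List.pyRange (i+1) idlist.length 1).foldl (fun chars j =>
      if (PySem.List.pyGetD idlist i "").toList.length ≠ (PySem.List.pyGetD idlist j "").toList.length then chars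
      else chars ++ oddcharsGo (PySem.List.pyGetD idlist i "").toList (PySem.List.pyGetD idlist j "").toList 0 false [] (-1)) chars) [])

-- ===== PORT B =====
-- 'for s in idlist: if len(s) > maxlen: maxlen = len(s)'  (lengths are Nats)
def bMaxlen (l : List (List Char)) : Nat :=
  l.foldl (fun acc s => if s.length > acc then s.length else acc) 0

-- body of 'for i, s in enumerate(idlist)' for one position p: the state is (buckets, hits);
-- s[:p] + s[p+1:] with p ≥ 0 is exactly take/drop; buckets.setdefault(m, []) … prev.append((i, s))
-- is read via getD and written back via Dict.modify (append at the key m).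
def bStep (n : Int) (p : Nat)
    (st : PySem.Dict (List Char) (List (Int × List Char)) × List (Int × List Char))
    (e : Int × List Char) :
    PySem.Dict (List Char) (List (Int × List Char)) × List (Int × List Char) :=
  if p < e.2.length then
    (st.1.modify (e.2.take p ++ e.2.drop (p+1)) [] (· ++ [(e.1, e.2)]),
     (st.1.getD (e.2.take p ++ e.2.drop (p+1)) []).foldl
       (fun hs jt => if jt.2 ≠ e.2 then hs ++ [(jt.1 * n + e.1, e.2.take p ++ e.2.drop (p+1))] else hs) st.2)
  else st

def findidenticalids_alt (idlist : List String) : String :=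
  let n : Int := idlist.length
  let E := PySem.List.enumerate (idlist.map String.toList) 0
  let maxlen := bMaxlen (idlist.map String.toList)
  let hits := (List.range maxlen).foldl
    (fun hs p => (E.foldl (bStep n p) (PySem.Dict.empty, hs)).2) []
  String.ofList (PySem.Chars.join []
    ((PySem.List.sorted hits (fun h => h.1) false).map (·.2)))

-- ===== PRECONDITION & SPEC =====
def Spec_findidenticalids (idlist : List String) (out : String) : Prop := out = findidenticalids_alt idlist
instance (idlist : List String) (out : String) : Decidable (Spec_findidenticalids idlist out) := by unfold Spec_findidenticalids; infer_instance

-- ===== CLAIM (what is proved, stated in full; the proofs are below) =====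
def Claim_equal_findidenticalids : Prop := ∀ (idlist : List String), Dom_findidenticalids idlist → Spec_findidenticalids idlist (findidenticalids idlist)

-- ===== LEMMAS AND PROOFS =====

-- s with position p removed
def maskP (p : Nat) (s : List Char) : List Char := s.take p ++ s.drop (p+1)

-- first index ≥ k where s and t disagree (capped at s.length); mirrors B's collision position
def bScan (s t : List Char) (k : Nat) : Nat :=
  if h : k < s.length ∧ s.getD k ' ' = t.getD k ' ' then bScan s t (k+1) else k
termination_by s.length - k

-- per-pair value of A (the 'continue' guard folded in)
def aContrib (s t : List Char) : List Char :=
  if s.length ≠ t.length then [] else oddcharsGo s t 0 false [] (-1)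

-- 'the pair (s, t) is at Hamming distance exactly 1'
abbrev ham1 (s t : List Char) : Prop :=
  s.length = t.length ∧ s ≠ t ∧ s.drop (bScan s t 0 + 1) = t.drop (bScan s t 0 + 1)

-- common pair-enumeration shape: all ordered pairs (earlier, later)
def pairsAux {α β : Type} (h : α → α → List β) : List α → List β
  | [] => []
  | x :: rest => rest.flatMap (h x) ++ pairsAux h rest

-- B's generation order: for each later element y, all earlier x (the bucket contents)
def goPairs {α β : Type} (F : α → α → List β) : List α → List α → List β
  | _, [] => []
  | pre, y :: rest => pre.flatMap (fun x => F x y) ++ goPairs F (pre ++ [y]) rest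

-- the condition under which position p detects the pair (x, y) in B
def condP (p : Nat) (s t : List Char) : Prop :=
  p < s.length ∧ p < t.length ∧ maskP p s = maskP p t ∧ s ≠ t

-- B's per-pair cell over all positions collapsed
def bCell (n : Int) (x y : Int × List Char) : List (Int × List Char) :=
  if ham1 x.2 y.2 then [(x.1 * n + y.1, maskP (bScan x.2 y.2 0) x.2)] else []

-- ---------- bScan facts ----------
lemma bScan_stop (s t : List Char) (k : Nat) (h : ¬ (k < s.length ∧ s.getD k ' ' = t.getD k ' ')) :
    bScan s t k = k := by rw [bScan, dif_neg h]

lemma bScan_step (s t : List Char) (k : Nat) (h : k < s.length ∧ s.getD k ' ' = t.getD k ' ') :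
    bScan s t k = bScan s t (k+1) := by rw [bScan, dif_pos h]

lemma bScan_agree (s t : List Char) (k q : Nat) (h1 : k ≤ q) (h2 : q < bScan s t k) :
    s.getD q ' ' = t.getD q ' ' := by
  induction hn : s.length - k using Nat.strong_induction_on generalizing k with
  | _ n ih =>
  by_cases h : k < s.length ∧ s.getD k ' ' = t.getD k ' '
  · rcases Nat.eq_or_lt_of_le h1 with rfl | hlt
    · exact h.2
    · rw [bScan_step s t k h] at h2
      exact ih (s.length - (k+1)) (by omega) (k+1) hlt h2 rfl
  · rw [bScan_stop s t k h] at h2; omega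

lemma bScan_not_stop (s t : List Char) (k : Nat) :
    ¬ (bScan s t k < s.length ∧ s.getD (bScan s t k) ' ' = t.getD (bScan s t k) ' ') := by
  induction hn : s.length - k using Nat.strong_induction_on generalizing k with
  | _ n ih =>
  by_cases h : k < s.length ∧ s.getD k ' ' = t.getD k ' '
  · rw [bScan_step s t k h]; exact ih (s.length - (k+1)) (by omega) (k+1) rfl
  · rw [bScan_stop s t k h]; exact h

lemma bScan_eq_of_first (s t : List Char) (p : Nat)
    (hlt : p < s.length) (hne : s.getD p ' ' ≠ t.getD p ' ')
    (hag : ∀ q < p, s.getD q ' ' = t.getD q ' ') : bScan s t 0 = p := by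
  rcases lt_trichotomy (bScan s t 0) p with hlt | heq | hgt
  · exact absurd ⟨by omega, hag _ hlt⟩ (bScan_not_stop s t 0)
  · exact heq
  · exact absurd (bScan_agree s t 0 p (Nat.zero_le _) hgt) hne

-- ---------- getD / take / drop bridges ----------
lemma take_eq_iff_getD (s t : List Char) (hlen : s.length = t.length) (p : Nat) :
    s.take p = t.take p ↔ ∀ q < p, s.getD q ' ' = t.getD q ' ' := by
  constructor
  · intro h q hq
    by_cases hql : q < s.length
    · have h1 : (s.take p)[q]'(by simp; omega) = (t.take p)[q]'(by simp; omega) := by simp [h]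
      rw [List.getD_eq_getElem _ _ hql, List.getD_eq_getElem _ _ (by omega : q < t.length)]
      simpa using h1
    · rw [List.getD_eq_default _ _ (by omega), List.getD_eq_default _ _ (by omega)]
  · intro h
    apply List.ext_getElem (by simp [hlen])
    intro i h1 h2
    have hi : i < s.length := by simp at h1; omega
    have hip : i < p := by simp at h1; omega
    have := h i hip
    rw [List.getD_eq_getElem _ _ hi, List.getD_eq_getElem _ _ (by omega : i < t.length)] at this
    simpa using this

lemma drop_eq_iff_getD (s t : List Char) (hlen : s.length = t.length) (p : Nat) :
    s.drop p = t.drop p ↔ ∀ q, p ≤ q → s.getD q ' ' = t.getD q ' ' := by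
  constructor
  · intro h q hq
    by_cases hql : q < s.length
    · have h1 : (s.drop p)[q-p]'(by simp; omega) = (t.drop p)[q-p]'(by simp; omega) := by simp [h]
      rw [List.getD_eq_getElem _ _ hql, List.getD_eq_getElem _ _ (by omega : q < t.length)]
      simpa [Nat.add_sub_cancel' hq] using h1
    · rw [List.getD_eq_default _ _ (by omega), List.getD_eq_default _ _ (by omega)]
  · intro h
    apply List.ext_getElem (by simp [hlen])
    intro i h1 h2
    have hi : p + i < s.length := by simp at h1; omega
    have := h (p + i) (by omega)
    rw [List.getD_eq_getElem _ _ hi, List.getD_eq_getElem _ _ (by omega : p + i < t.length)] at this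
    simpa using this

lemma eq_of_getD_all (s t : List Char) (hlen : s.length = t.length)
    (h : ∀ q, s.getD q ' ' = t.getD q ' ') : s = t := by
  have := (drop_eq_iff_getD s t hlen 0).mpr (fun q _ => h q)
  simpa using this

-- mask equality splits into take/drop equality when p is inside both strings
lemma maskP_eq_iff (s t : List Char) (p : Nat) (hs : p < s.length) (ht : p < t.length) :
    maskP p s = maskP p t ↔ s.take p = t.take p ∧ s.drop (p+1) = t.drop (p+1) := by
  unfold maskP
  constructor
  · intro h
    have hl : (s.take p).length = (t.take p).length := by
      simp [Nat.min_eq_left (le_of_lt hs), Nat.min_eq_left (le_of_lt ht)]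
    exact List.append_inj h (by simpa using hl)
  · rintro ⟨h1, h2⟩; rw [h1, h2]

-- ---------- the position-collapse: condP p ↔ ham1 ∧ p = bScan ----------
lemma ham1_scan_lt (s t : List Char) (h : ham1 s t) : bScan s t 0 < s.length := by
  obtain ⟨hlen, hne, _⟩ := h
  rcases Nat.lt_or_ge (bScan s t 0) s.length with h1 | h1
  · exact h1
  · exfalso
    apply hne
    apply eq_of_getD_all s t hlen
    intro q
    by_cases hq : q < s.length
    · exact bScan_agree s t 0 q (Nat.zero_le _) (by omega)
    · rw [List.getD_eq_default _ _ (by omega), List.getD_eq_default _ _ (by omega)]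

lemma condP_iff (p : Nat) (s t : List Char) :
    condP p s t ↔ ham1 s t ∧ p = bScan s t 0 := by
  constructor
  · rintro ⟨hps, hpt, hmask, hne⟩
    have hlen : s.length = t.length := by
      have := congrArg List.length hmask
      simp [maskP] at this
      omega
    obtain ⟨htake, hdrop⟩ := (maskP_eq_iff s t p hps hpt).mp hmask
    have hag : ∀ q < p, s.getD q ' ' = t.getD q ' ' := (take_eq_iff_getD s t hlen p).mp htake
    have hdr : ∀ q, p + 1 ≤ q → s.getD q ' ' = t.getD q ' ' := (drop_eq_iff_getD s t hlen (p+1)).mp hdrop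
    have hmis : s.getD p ' ' ≠ t.getD p ' ' := by
      intro hp
      apply hne
      apply eq_of_getD_all s t hlen
      intro q
      rcases Nat.lt_trichotomy q p with h | rfl | h
      · exact hag q h
      · exact hp
      · exact hdr q (by omega)
    have hk : bScan s t 0 = p := bScan_eq_of_first s t p hps hmis hag
    exact ⟨⟨hlen, hne, by rw [hk]; exact hdrop⟩, hk.symm⟩
  · rintro ⟨⟨hlen, hne, hdrop⟩, rfl⟩
    have hlt : bScan s t 0 < s.length := ham1_scan_lt s t ⟨hlen, hne, hdrop⟩
    refine ⟨hlt, by omega, ?_, hne⟩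
    rw [maskP_eq_iff s t _ hlt (by omega)]
    refine ⟨(take_eq_iff_getD s t hlen _).mpr ?_, hdrop⟩
    intro q hq
    exact bScan_agree s t 0 q (Nat.zero_le _) hq

-- ---------- A characterisation (per pair) ----------
lemma drop_iff (s t : List Char) (i : Nat) (hi : i < s.length) (hit : i < t.length) :
    (s.drop i = t.drop i) ↔ (s.getD i ' ' = t.getD i ' ' ∧ s.drop (i+1) = t.drop (i+1)) := by
  rw [List.drop_eq_getElem_cons hi, List.drop_eq_getElem_cons hit]
  rw [List.getD_eq_getElem s ' ' hi, List.getD_eq_getElem t ' ' hit]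
  exact List.cons_eq_cons
lemma oddA_true_eq (s t : List Char) (hlen : s.length = t.length) :
    ∀ i oc p, s.drop i = t.drop i →
      oddcharsGo s t i true oc p =
        (if 0 ≤ p then PySem.List.slice s none (some p) ++ PySem.List.slice t (some (p+1)) none else []) := by
  suffices H : ∀ n i oc p, s.length - i = n → s.drop i = t.drop i →
      oddcharsGo s t i true oc p =
        (if 0 ≤ p then PySem.List.slice s none (some p) ++ PySem.List.slice t (some (p+1)) none else []) by
    intro i oc p hd; exact H _ i oc p rfl hd
  intro n
  induction n with
  | zero =>
    intro i oc p hn hd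
    rw [oddcharsGo, dif_neg (by omega)]
  | succ n ih =>
    intro i oc p hn hd
    have hi : i < s.length := by omega
    have hit : i < t.length := by omega
    obtain ⟨hhd, htl⟩ := (drop_iff s t i hi hit).mp hd
    rw [oddcharsGo, dif_pos hi, if_neg (by simpa using hhd)]
    exact ih (i+1) oc p (by omega) htl

lemma oddA_true_ne (s t : List Char) (hlen : s.length = t.length) :
    ∀ i oc p, s.drop i ≠ t.drop i → oddcharsGo s t i true oc p = [] := by
  suffices H : ∀ n i oc p, s.length - i = n → s.drop i ≠ t.drop i → oddcharsGo s t i true oc p = [] by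
    intro i oc p hd; exact H _ i oc p rfl hd
  intro n
  induction n with
  | zero =>
    intro i oc p hn hd
    exact absurd (by rw [List.drop_eq_nil_of_le (by omega), List.drop_eq_nil_of_le (by omega)]) hd
  | succ n ih =>
    intro i oc p hn hd
    by_cases hi : i < s.length
    · have hit : i < t.length := by omega
      by_cases hhd : s.getD i ' ' = t.getD i ' '
      · have htl : s.drop (i+1) ≠ t.drop (i+1) := fun he =>
          hd ((drop_iff s t i hi hit).mpr ⟨hhd, he⟩)
        rw [oddcharsGo, dif_pos hi, if_neg (by simpa using hhd)]
        exact ih (i+1) oc p (by omega) htl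
      · rw [oddcharsGo, dif_pos hi, if_pos (by simpa using hhd)]
        simp
    · exact absurd (by rw [List.drop_eq_nil_of_le (by omega), List.drop_eq_nil_of_le (by omega)]) hd

lemma oddA_main (s t : List Char) (hlen : s.length = t.length) :
    ∀ i oc, oddcharsGo s t i false oc (-1) =
      (if s.drop i = t.drop i then []
       else if s.drop (bScan s t i + 1) = t.drop (bScan s t i + 1) then
         s.take (bScan s t i) ++ t.drop (bScan s t i + 1)
       else []) := by
  suffices H : ∀ n i oc, s.length - i = n →
      oddcharsGo s t i false oc (-1) =
        (if s.drop i = t.drop i then []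
         else if s.drop (bScan s t i + 1) = t.drop (bScan s t i + 1) then
           s.take (bScan s t i) ++ t.drop (bScan s t i + 1)
         else []) by
    intro i oc; exact H _ i oc rfl
  intro n
  induction n with
  | zero =>
    intro i oc hn
    have hd : s.drop i = t.drop i := by
      rw [List.drop_eq_nil_of_le (by omega), List.drop_eq_nil_of_le (by omega)]
    rw [oddcharsGo, dif_neg (by omega), if_neg (by norm_num), if_pos hd]
  | succ n ih =>
    intro i oc hn
    have hi : i < s.length := by omega
    have hit : i < t.length := by omega
    by_cases hhd : s.getD i ' ' = t.getD i ' '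
    · have hscan : bScan s t i = bScan s t (i+1) := bScan_step s t i ⟨hi, hhd⟩
      have hdi : (s.drop i = t.drop i) ↔ (s.drop (i+1) = t.drop (i+1)) := by
        rw [drop_iff s t i hi hit]
        exact ⟨fun h => h.2, fun h => ⟨hhd, h⟩⟩
      rw [oddcharsGo, dif_pos hi, if_neg (by simpa using hhd), ih (i+1) oc (by omega), hscan]
      by_cases hd : s.drop (i+1) = t.drop (i+1)
      · rw [if_pos hd, if_pos (hdi.mpr hd)]
      · rw [if_neg hd, if_neg (fun h => hd (hdi.mp h))]
    · have hscan : bScan s t i = i := bScan_stop s t i (fun h => hhd h.2)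
      have hd : s.drop i ≠ t.drop i := fun h => hhd ((drop_iff s t i hi hit).mp h).1
      rw [oddcharsGo, dif_pos hi, if_pos (by simpa using hhd)]
      simp only [Bool.false_eq_true, if_false]
      rw [if_neg hd, hscan]
      by_cases he : s.drop (i+1) = t.drop (i+1)
      · rw [if_pos he, oddA_true_eq s t hlen (i+1) _ (i : Int) he,
            if_pos (by positivity)]
        have hc : ((i : Int) + 1) = ((i + 1 : Nat) : Int) := by push_cast; ring
        rw [hc, PySem.List.slice_to_natCast, PySem.List.slice_from_natCast]
      · rw [if_neg he, oddA_true_ne s t hlen (i+1) _ (i : Int) he]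

-- aContrib in terms of ham1 and maskP
lemma aContrib_eq (s t : List Char) :
    aContrib s t = if ham1 s t then maskP (bScan s t 0) s else [] := by
  unfold aContrib
  by_cases hlen : s.length = t.length
  · rw [if_neg (not_not_intro hlen), oddA_main s t hlen 0 []]
    simp only [List.drop_zero]
    by_cases hst : s = t
    · rw [if_pos hst, if_neg (fun h => h.2.1 hst)]
    · rw [if_neg hst]
      by_cases he : s.drop (bScan s t 0 + 1) = t.drop (bScan s t 0 + 1)
      · rw [if_pos he, if_pos (⟨hlen, hst, he⟩ : ham1 s t), maskP, ← he]
      · rw [if_neg he, if_neg (fun h => he h.2.2)]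
  · rw [if_pos hlen, if_neg (fun h => hlen h.1)]

-- ---------- pairsAux shapes ----------
lemma pairsAux_map {α γ β : Type} (h : γ → γ → List β) (f : α → γ) (l : List α) :
    pairsAux h (l.map f) = pairsAux (fun x y => h (f x) (f y)) l := by
  induction l with
  | nil => rfl
  | cons x rest ih => simp [pairsAux, ih, List.flatMap_map]

lemma pairsAux_enumerate {α β : Type} (f : α → α → List β) (l : List α) :
    ∀ s, pairsAux (fun x y => f x.2 y.2) (PySem.List.enumerate l s) = pairsAux f l := by
  induction l with
  | nil => intro s; simp [PySem.List.enumerate_nil, pairsAux]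
  | cons x rest ih =>
    intro s
    rw [PySem.List.enumerate_cons, pairsAux, pairsAux, ih]
    congr 1
    have h1 : (PySem.List.enumerate rest (s+1)).flatMap (fun y => f x y.2)
        = ((PySem.List.enumerate rest (s+1)).map (·.2)).flatMap (f x) := by
      rw [List.flatMap_map]
    rw [h1, PySem.List.map_snd_enumerate]

-- flatMap over a filter pulls the test into the function
lemma flatMap_filter {α β : Type} (g : α → List β) (q : α → Bool) (l : List α) :
    (l.filter q).flatMap g = l.flatMap (fun x => if q x then g x else []) := by
  induction l with
  | nil => rfl
  | cons x rest ih =>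
    by_cases h : q x <;> simp [h, ih]

lemma pairsAux_filter {α β : Type} (F : α → α → List β) (q : α → Bool) (l : List α) :
    pairsAux F (l.filter q) = pairsAux (fun x y => if q x ∧ q y then F x y else []) l := by
  induction l with
  | nil => rfl
  | cons x rest ih =>
    rw [List.filter_cons]
    by_cases h : q x
    · simp only [h, if_pos]
      rw [pairsAux, ih, pairsAux, flatMap_filter]
      congr 1
      apply List.flatMap_congr
      intro y _
      simp [h]
    · simp only [h, Bool.false_eq_true, if_false]
      rw [ih, pairsAux]
      have : rest.flatMap (fun y => if q x ∧ q y then F x y else []) = [] := by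
        apply List.flatMap_eq_nil_iff.mpr
        intro y _
        simp [h]
      rw [this, List.nil_append]

lemma pairsAux_congr {α β : Type} (F G : α → α → List β) (l : List α)
    (h : ∀ x ∈ l, ∀ y ∈ l, F x y = G x y) : pairsAux F l = pairsAux G l := by
  induction l with
  | nil => rfl
  | cons x rest ih =>
    rw [pairsAux, pairsAux, ih (fun a ha b hb => h a (by simp [ha]) b (by simp [hb]))]
    congr 1
    exact List.flatMap_congr (fun y hy => h x (by simp) y (by simp [hy]))

lemma pairsAux_append_singleton_perm {α β : Type} (F : α → α → List β) (l : List α) (e : α) :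
    (pairsAux F (l ++ [e])).Perm (pairsAux F l ++ l.flatMap (fun x => F x e)) := by
  induction l with
  | nil => simp [pairsAux]
  | cons x rest ih =>
    have h1 : pairsAux F (x :: rest ++ [e])
        = rest.flatMap (F x) ++ (F x e ++ pairsAux F (rest ++ [e])) := by
      simp [pairsAux, List.flatMap_append, List.append_assoc]
    have h3 : pairsAux F (x :: rest) ++ (x :: rest).flatMap (fun y => F y e)
        = rest.flatMap (F x) ++ (pairsAux F rest ++ (F x e ++ rest.flatMap (fun y => F y e))) := by
      simp [pairsAux, List.append_assoc]
    rw [h1, h3]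
    refine List.Perm.trans ((ih.append_left _).append_left _) ?_
    have := (List.perm_append_comm_assoc (F x e) (pairsAux F rest) (rest.flatMap (fun y => F y e)))
    exact this.append_left _

lemma goPairs_perm {α β : Type} (F : α → α → List β) :
    ∀ (l pre : List α), (goPairs F pre l ++ pairsAux F pre).Perm (pairsAux F (pre ++ l)) := by
  intro l
  induction l with
  | nil => intro pre; simp [goPairs]
  | cons y rest ih =>
    intro pre
    have e1 : pre ++ y :: rest = (pre ++ [y]) ++ rest := by simp
    rw [e1]
    show ((pre.flatMap (fun x => F x y) ++ goPairs F (pre ++ [y]) rest) ++ pairsAux F pre).Perm _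
    rw [List.append_assoc]
    refine List.Perm.trans (List.perm_append_comm_assoc _ _ _) ?_
    refine List.Perm.trans (List.Perm.append_left _ ?_) (ih (pre ++ [y]))
    exact (List.perm_append_comm).trans (pairsAux_append_singleton_perm F pre y).symm

lemma mem_pairsAux {α β : Type} (F : α → α → List β) (l : List α) (e : β)
    (h : e ∈ pairsAux F l) : ∃ x ∈ l, ∃ y ∈ l, e ∈ F x y := by
  induction l with
  | nil => simp [pairsAux] at h
  | cons x rest ih =>
    rw [pairsAux, List.mem_append] at h
    rcases h with h | h
    · obtain ⟨y, hy, he⟩ := List.mem_flatMap.mp h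
      exact ⟨x, by simp, y, by simp [hy], he⟩
    · obtain ⟨a, ha, b, hb, he⟩ := ih h
      exact ⟨a, by simp [ha], b, by simp [hb], he⟩

-- flatMap of a pointwise append, as a permutation
lemma flatMap_append_perm {α β : Type} (f g : α → List β) (l : List α) :
    (l.flatMap (fun x => f x ++ g x)).Perm (l.flatMap f ++ l.flatMap g) := by
  induction l with
  | nil => simp
  | cons x rest ih =>
    have h1 : (x :: rest).flatMap (fun x => f x ++ g x)
        = f x ++ (g x ++ rest.flatMap (fun x => f x ++ g x)) := by simp
    have h2 : (x :: rest).flatMap f ++ (x :: rest).flatMap g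
        = f x ++ (rest.flatMap f ++ (g x ++ rest.flatMap g)) := by simp
    rw [h1, h2]
    exact ((ih.append_left _).append_left _).trans
      ((List.perm_append_comm_assoc _ _ _).append_left _)

-- commuting a double flatMap is a permutation
lemma flatMap_comm_perm {α γ β : Type} (g : γ → α → List β) (ps : List γ) (l : List α) :
    (ps.flatMap (fun p => l.flatMap (g p))).Perm (l.flatMap (fun y => ps.flatMap (fun p => g p y))) := by
  induction l with
  | nil => simp
  | cons y rest ih =>
    have e1 : ps.flatMap (fun p => (y :: rest).flatMap (g p))
        = ps.flatMap (fun p => g p y ++ rest.flatMap (g p)) := by simp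
    have e2 : (y :: rest).flatMap (fun y => ps.flatMap (fun p => g p y))
        = ps.flatMap (fun p => g p y) ++ rest.flatMap (fun y => ps.flatMap (fun p => g p y)) := by simp
    rw [e1, e2]
    exact (flatMap_append_perm _ _ ps).trans (ih.append_left _)

-- flatMap respects pointwise permutation
lemma flatMap_perm_congr {α β : Type} (f g : α → List β) (l : List α)
    (h : ∀ x ∈ l, (f x).Perm (g x)) : (l.flatMap f).Perm (l.flatMap g) := by
  induction l with
  | nil => simp
  | cons x rest ih =>
    simpa using (h x (by simp)).append (ih (fun a ha => h a (by simp [ha])))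

-- summing pairsAux over positions commutes, as a permutation
lemma flatMap_pairsAux_perm {α β : Type} (H : Nat → α → α → List β) (ps : List Nat) (l : List α) :
    ((ps.flatMap (fun p => pairsAux (H p) l))).Perm
      (pairsAux (fun x y => ps.flatMap (fun p => H p x y)) l) := by
  induction l with
  | nil => simp [pairsAux]
  | cons x rest ih =>
    have e1 : ps.flatMap (fun p => pairsAux (H p) (x :: rest))
        = ps.flatMap (fun p => rest.flatMap (H p x) ++ pairsAux (H p) rest) := by
      simp only [pairsAux]
    rw [e1, show pairsAux (fun x y => ps.flatMap (fun p => H p x y)) (x :: rest)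
        = rest.flatMap (fun y => ps.flatMap (fun p => H p x y)) ++
          pairsAux (fun x y => ps.flatMap (fun p => H p x y)) rest from rfl]
    exact (flatMap_append_perm _ _ ps).trans ((flatMap_comm_perm (fun p y => H p x y) ps rest).append ih)

lemma flatMap_range_single {β : Type} (N p0 : Nat) (v : Nat → List β)
    (h : ∀ p, (v p ≠ []) → p = p0) (hN : p0 < N) :
    (List.range N).flatMap v = v p0 := by
  induction N with
  | zero => omega
  | succ N ih =>
    rw [List.range_succ, List.flatMap_append, List.flatMap_singleton]
    rcases Nat.lt_or_ge p0 N with hlt | hge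
    · rw [ih hlt]
      have : v N = [] := by
        by_contra hne
        have := h N hne
        omega
      simp [this]
    · have hp0 : p0 = N := by omega
      subst hp0
      have : (List.range p0).flatMap v = [] := by
        apply List.flatMap_eq_nil_iff.mpr
        intro p hp
        by_contra hne
        have := h p hne
        simp [List.mem_range] at hp
        omega
      simp [this]

-- ---------- B's fold characterisation ----------
-- the dict built from a prefix of entries groups them by mask
def bDict (p : Nat) (pre : List (Int × List Char)) :
    PySem.Dict (List Char) (List (Int × List Char)) :=
  pre.foldl (fun d e => d.modify (maskP p e.2) [] (· ++ [(e.1, e.2)])) PySem.Dict.empty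

lemma bDict_getD (p : Nat) (pre : List (Int × List Char)) (m : List Char) :
    (bDict p pre).getD m [] = pre.filter (fun e => maskP p e.2 == m) := by
  have h1 : bDict p pre
      = (pre.map (fun e => (maskP p e.2, e))).foldl
          (fun d q => d.modify q.1 [] (· ++ [q.2])) PySem.Dict.empty := by
    rw [List.foldl_map]
    rfl
  rw [h1, PySem.Dict.getD_foldl_modify_append, PySem.Dict.getD_empty, List.nil_append,
    List.filter_map, List.map_map]
  simp [Function.comp_def]

-- B's per-pair detector at position p (before collapsing over p)
def bF (n : Int) (p : Nat) (x y : Int × List Char) : List (Int × List Char) :=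
  if maskP p x.2 = maskP p y.2 ∧ x.2 ≠ y.2 then [(x.1 * n + y.1, maskP p y.2)] else []

-- flatMap of a guarded singleton is filter + map
lemma flatMap_ite_singleton {α β : Type} (c : α → Prop) [DecidablePred c] (g : α → β) (l : List α) :
    l.flatMap (fun x => if c x then [g x] else []) = (l.filter (fun x => decide (c x))).map g := by
  induction l with
  | nil => rfl
  | cons x rest ih =>
    by_cases h : c x <;> simp [h, ih]

lemma bStep_fold (n : Int) (p : Nat) :
    ∀ (l pre : List (Int × List Char)) (hs : List (Int × List Char)),
      (∀ e ∈ l, p < e.2.length) →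
      (l.foldl (bStep n p) (bDict p pre, hs)).2 = hs ++ goPairs (bF n p) pre l := by
  intro l
  induction l with
  | nil => intro pre hs _; simp [goPairs]
  | cons e rest ih =>
    intro pre hs hlen
    have hp : p < e.2.length := hlen e (by simp)
    have hdict : (bDict p pre).modify (e.2.take p ++ e.2.drop (p+1)) [] (· ++ [(e.1, e.2)])
        = bDict p (pre ++ [e]) := by
      rw [show bDict p (pre ++ [e]) = (bDict p pre).modify (maskP p e.2) [] (· ++ [(e.1, e.2)]) from by
        rw [bDict, bDict, List.foldl_append]; rfl]
      rfl
    have hhits : ((bDict p pre).getD (e.2.take p ++ e.2.drop (p+1)) []).foldl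
        (fun hs jt => if jt.2 ≠ e.2 then hs ++ [(jt.1 * n + e.1, e.2.take p ++ e.2.drop (p+1))] else hs) hs
        = hs ++ pre.flatMap (fun x => bF n p x e) := by
      have hmm : e.2.take p ++ e.2.drop (p+1) = maskP p e.2 := rfl
      rw [hmm, bDict_getD, PySem.List.foldl_append_ite]
      congr 1
      have hbf : (fun x => bF n p x e)
          = fun x => if maskP p x.2 = maskP p e.2 ∧ x.2 ≠ e.2 then [(x.1 * n + e.1, maskP p e.2)] else [] := by
        funext x
        rfl
      rw [hbf, flatMap_ite_singleton, List.filter_filter]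
      congr 1
      apply List.filter_congr
      intro x _
      by_cases h1 : maskP p x.2 = maskP p e.2 <;> by_cases h2 : x.2 = e.2 <;> simp [h1, h2]
    have hstep : bStep n p (bDict p pre, hs) e
        = (bDict p (pre ++ [e]), hs ++ pre.flatMap (fun x => bF n p x e)) := by
      rw [bStep, if_pos hp]
      exact Prod.ext hdict hhits
    rw [List.foldl_cons, hstep, ih (pre ++ [e]) _ (fun a ha => hlen a (by simp [ha])),
      goPairs, List.append_assoc]

lemma bHitsAt (n : Int) (p : Nat) (E : List (Int × List Char)) (hs : List (Int × List Char)) :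
    (E.foldl (bStep n p) (PySem.Dict.empty, hs)).2
      = hs ++ goPairs (bF n p) [] (E.filter (fun e => decide (p < e.2.length))) := by
  have h0 : E.foldl (bStep n p) (PySem.Dict.empty, hs)
      = E.foldl (fun st e => if p < e.2.length then bStep n p st e else st) (PySem.Dict.empty, hs) := by
    apply PySem.List.foldl_congr_mem
    intro st e _
    by_cases h : p < e.2.length
    · rw [if_pos h]
    · rw [if_neg h, bStep, if_neg h]
  rw [h0, PySem.List.foldl_ite_eq_foldl_filter]
  have : (PySem.Dict.empty : PySem.Dict (List Char) (List (Int × List Char))) = bDict p [] := rfl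
  rw [this]
  exact bStep_fold n p _ [] hs (fun e he => of_decide_eq_true (List.mem_filter.mp he).2)

-- ---------- maxlen ----------
lemma bMaxlen_ge (l : List (List Char)) : ∀ s ∈ l, s.length ≤ bMaxlen l := by
  have h1 : bMaxlen l = l.foldl (fun acc s => max acc s.length) 0 := by
    unfold bMaxlen
    apply PySem.List.foldl_congr_mem
    intro acc s _
    rcases Nat.lt_or_ge acc s.length with h | h
    · rw [if_pos h, Nat.max_eq_right (by omega)]
    · rw [if_neg (by omega), Nat.max_eq_left h]
  rw [h1]
  exact (PySem.List.le_foldl_max_nat l (fun s => s.length) 0).2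

-- ---------- keys are strictly increasing along the target list ----------
lemma mem_bCell_key (n : Int) (x y e : Int × List Char) (h : e ∈ bCell n x y) :
    e.1 = x.1 * n + y.1 := by
  unfold bCell at h
  split at h
  · simp at h; rw [h]
  · simp at h

lemma bCell_flat_pairwise (n : Int) (x : Int × List Char) :
    ∀ (r : List (Int × List Char)), r.Pairwise (fun a b => a.1 < b.1) →
      (r.flatMap (bCell n x)).Pairwise (fun u v => u.1 < v.1) := by
  intro r
  induction r with
  | nil => simp
  | cons y rest ih =>
    intro hp
    rw [List.flatMap_cons]
    apply List.pairwise_append.mpr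
    refine ⟨?_, ih (List.Pairwise.sublist (List.sublist_cons_self _ _) hp), ?_⟩
    · unfold bCell
      split <;> simp
    · intro e1 he1 e2 he2
      obtain ⟨y', hy', he2'⟩ := List.mem_flatMap.mp he2
      rw [mem_bCell_key n x y e1 he1, mem_bCell_key n x y' e2 he2']
      have hyy : y.1 < y'.1 := (List.pairwise_cons.mp hp).1 y' hy'
      omega

lemma keys_pairwise_aux (n : Int) :
    ∀ (l : List (Int × List Char)), l.Pairwise (fun a b => a.1 < b.1) →
      (∀ x ∈ l, 0 ≤ x.1 ∧ x.1 < n) →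
      (pairsAux (bCell n) l).Pairwise (fun u v => u.1 < v.1) := by
  intro l
  induction l with
  | nil => intro _ _; simp [pairsAux]
  | cons x rest ih =>
    intro hp hb
    have hptail := (List.pairwise_cons.mp hp).2
    have hhead := (List.pairwise_cons.mp hp).1
    rw [pairsAux]
    apply List.pairwise_append.mpr
    refine ⟨bCell_flat_pairwise n x rest hptail, ih hptail (fun a ha => hb a (by simp [ha])), ?_⟩
    intro e1 he1 e2 he2
    obtain ⟨y, hy, he1'⟩ := List.mem_flatMap.mp he1
    obtain ⟨x', hx', y', hy', he2'⟩ := mem_pairsAux _ _ _ he2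
    rw [mem_bCell_key n x y e1 he1', mem_bCell_key n x' y' e2 he2']
    have h1 : x.1 < x'.1 := hhead x' hx'
    have h2 : y.1 < n := (hb y (by simp [hy])).2
    have h3 : 0 ≤ y'.1 := (hb y' (by simp [hy'])).1
    have h4 : 0 ≤ y.1 := (hb y (by simp [hy])).1
    nlinarith [mul_le_mul_of_nonneg_right (show x.1 + 1 ≤ x'.1 by omega) (show (0:Int) ≤ n by omega)]

lemma pairsAux_keys_pairwise (l : List String) :
    (pairsAux (bCell (l.length : Int)) (PySem.List.enumerate (l.map String.toList) 0)).Pairwise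
      (fun u v => u.1 < v.1) := by
  apply keys_pairwise_aux
  · exact PySem.List.pairwise_lt_enumerate _ _
  · intro x hx
    obtain ⟨k, hk, hx'⟩ := (PySem.List.mem_enumerate_iff _ _ _).mp hx
    rw [hx']
    constructor
    · simp
    · simp only [List.length_map] at hk
      simp
      exact_mod_cast hk

-- ---------- shapes of the two programs ----------
lemma pairs_index {α β : Type} [Inhabited α] (h : α → α → List β) (l : List α) (d : α) :
    ∀ a : Nat, a ≤ l.length →
      (PySem.List.pyRange (a : Int) (l.length : Int) 1).flatMap (fun i =>
        (PySem.List.pyRange (i+1) (l.length : Int) 1).flatMap (fun j =>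
          h (PySem.List.pyGetD l i d) (PySem.List.pyGetD l j d))) = pairsAux h (l.drop a) := by
  suffices H : ∀ n a : Nat, a ≤ l.length → l.length - a = n →
      (PySem.List.pyRange (a : Int) (l.length : Int) 1).flatMap (fun i =>
        (PySem.List.pyRange (i+1) (l.length : Int) 1).flatMap (fun j =>
          h (PySem.List.pyGetD l i d) (PySem.List.pyGetD l j d))) = pairsAux h (l.drop a) by
    intro a ha; exact H _ a ha rfl
  intro n
  induction n with
  | zero =>
    intro a ha h0
    have hae : a = l.length := by omega
    subst hae
    rw [PySem.List.pyRange_one_eq_nil (by exact_mod_cast le_refl _)]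
    simp [pairsAux]
  | succ n ih =>
    intro a ha hn
    have halt : a < l.length := by omega
    rw [PySem.List.pyRange_one_cons (by exact_mod_cast halt)]
    rw [List.flatMap_cons]
    have hc1 : ((a : Int) + 1) = ((a + 1 : Nat) : Int) := by push_cast; ring
    have hrest : (PySem.List.pyRange ((a : Int) + 1) (l.length : Int) 1).flatMap (fun i =>
        (PySem.List.pyRange (i+1) (l.length : Int) 1).flatMap (fun j =>
          h (PySem.List.pyGetD l i d) (PySem.List.pyGetD l j d))) = pairsAux h (l.drop (a+1)) := by
      rw [hc1]; exact ih (a+1) (by omega) (by omega)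
    rw [hrest]
    have hmap : (PySem.List.pyRange ((a : Int) + 1) (l.length : Int) 1).map
        (fun j => PySem.List.pyGetD l j d) = l.drop (a+1) := by
      have hlen' : ((l.length : Int)) = PySem.List.len l := by simp [PySem.List.len]
      rw [hc1, hlen', PySem.List.map_pyGetD_pyRange l d (by positivity)]
      simp
    have hfm : (PySem.List.pyRange ((a : Int) + 1) (l.length : Int) 1).flatMap
        (fun j => h (PySem.List.pyGetD l (a : Int) d) (PySem.List.pyGetD l j d))
        = (l.drop (a+1)).flatMap (h (PySem.List.pyGetD l (a : Int) d)) := by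
      rw [← hmap, List.flatMap_map]
    rw [hfm]
    have hdrop : l.drop a = l[a] :: l.drop (a+1) := List.drop_eq_getElem_cons halt
    rw [hdrop, pairsAux]
    have hget : PySem.List.pyGetD l (a : Int) d = l[a] := by
      simp [PySem.List.pyGetD_natCast, List.getD_eq_getElem?_getD, halt]
    rw [hget]
lemma a_shape (idlist : List String) :
    findidenticalids idlist =
      String.ofList (pairsAux (fun x y : String => aContrib x.toList y.toList) idlist) := by
  unfold findidenticalids
  have hinner : ∀ (chars : List Char) (i : Int),
      (PySem.List.pyRange (i+1) (idlist.length : Int) 1).foldl (fun chars j =>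
        if (PySem.List.pyGetD idlist i "").toList.length ≠ (PySem.List.pyGetD idlist j "").toList.length then chars
        else chars ++ oddcharsGo (PySem.List.pyGetD idlist i "").toList (PySem.List.pyGetD idlist j "").toList 0 false [] (-1)) chars
      = chars ++ (PySem.List.pyRange (i+1) (idlist.length : Int) 1).flatMap (fun j =>
          aContrib (PySem.List.pyGetD idlist i "").toList (PySem.List.pyGetD idlist j "").toList) := by
    intro chars i
    have hb : (fun (chars : List Char) (j : Int) =>
        if (PySem.List.pyGetD idlist i "").toList.length ≠ (PySem.List.pyGetD idlist j "").toList.length then chars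
        else chars ++ oddcharsGo (PySem.List.pyGetD idlist i "").toList (PySem.List.pyGetD idlist j "").toList 0 false [] (-1))
        = fun chars j => chars ++ aContrib (PySem.List.pyGetD idlist i "").toList (PySem.List.pyGetD idlist j "").toList := by
      funext chars j
      unfold aContrib
      split_ifs <;> simp_all
    rw [hb, PySem.List.foldl_append_eq_flatMap]
  simp only [hinner]
  rw [PySem.List.foldl_append_eq_flatMap, List.nil_append]
  have hp := pairs_index (fun x y : String => aContrib x.toList y.toList) idlist "" 0 (Nat.zero_le _)
  simp only [Nat.cast_zero, List.drop_zero] at hp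
  rw [hp]

lemma join_nil_flatten (l : List (List Char)) : PySem.Chars.join [] l = l.flatten := by
  induction l with
  | nil => simp [PySem.Chars.join_nil]
  | cons a rest ih =>
    cases rest with
    | nil => simp [PySem.Chars.join_singleton]
    | cons b r => rw [PySem.Chars.join_cons_cons] at *; simp_all

-- collapsing the per-position detectors over all positions gives bCell
lemma bCollapse (n : Int) (maxlen : Nat) (x y : Int × List Char)
    (hx : x.2.length ≤ maxlen) :
    (List.range maxlen).flatMap (fun p =>
      if (decide (p < x.2.length) = true ∧ decide (p < y.2.length) = true) then bF n p x y else [])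
      = bCell n x y := by
  have hv : ∀ p, (if (decide (p < x.2.length) = true ∧ decide (p < y.2.length) = true) then bF n p x y else []) ≠ []
      → condP p x.2 y.2 := by
    intro p hne
    by_cases h1 : (decide (p < x.2.length) = true ∧ decide (p < y.2.length) = true)
    · rw [if_pos h1] at hne
      unfold bF at hne
      by_cases h2 : maskP p x.2 = maskP p y.2 ∧ x.2 ≠ y.2
      · exact ⟨of_decide_eq_true h1.1, of_decide_eq_true h1.2, h2.1, h2.2⟩
      · rw [if_neg h2] at hne; exact absurd rfl hne
    · rw [if_neg h1] at hne; exact absurd rfl hne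
  by_cases hh : ham1 x.2 y.2
  · have hk := ham1_scan_lt x.2 y.2 hh
    have hstep := flatMap_range_single maxlen (bScan x.2 y.2 0)
      (fun p => if (decide (p < x.2.length) = true ∧ decide (p < y.2.length) = true) then bF n p x y else [])
      (fun p hne => ((condP_iff p x.2 y.2).mp (hv p hne)).2)
      (by omega)
    rw [hstep]
    have hc : condP (bScan x.2 y.2 0) x.2 y.2 := (condP_iff _ x.2 y.2).mpr ⟨hh, rfl⟩
    show (if _ then bF n (bScan x.2 y.2 0) x y else []) = bCell n x y
    rw [if_pos ⟨decide_eq_true hc.1, decide_eq_true hc.2.1⟩]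
    unfold bF bCell
    rw [if_pos ⟨hc.2.2.1, hc.2.2.2⟩, if_pos hh, ← hc.2.2.1]
  · have hnil : ∀ p ∈ List.range maxlen,
        (if (decide (p < x.2.length) = true ∧ decide (p < y.2.length) = true) then bF n p x y else []) = [] := by
      intro p _
      by_contra hne
      exact hh ((condP_iff p x.2 y.2).mp (hv p hne)).1
    unfold bCell
    rw [if_neg hh]
    exact List.flatMap_eq_nil_iff.mpr hnil

lemma b_shape (idlist : List String) :
    findidenticalids_alt idlist =
      String.ofList ((pairsAux (bCell idlist.length)
        (PySem.List.enumerate (idlist.map String.toList) 0)).flatMap (·.2)) := by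
  simp only [findidenticalids_alt]
  set n : Int := (idlist.length : Int) with hn
  set E := PySem.List.enumerate (idlist.map String.toList) 0 with hE
  set maxlen := bMaxlen (idlist.map String.toList) with hml
  have hhits1 : (List.range maxlen).foldl
      (fun hs p => (E.foldl (bStep n p) (PySem.Dict.empty, hs)).2) []
      = (List.range maxlen).flatMap
          (fun p => goPairs (bF n p) [] (E.filter (fun e => decide (p < e.2.length)))) := by
    rw [PySem.List.foldl_congr_mem (List.range maxlen) _
      (fun hs p => hs ++ goPairs (bF n p) [] (E.filter (fun e => decide (p < e.2.length)))) []
      (fun hs p _ => bHitsAt n p E hs)]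
    rw [PySem.List.foldl_append_eq_flatMap, List.nil_append]
  have hperm : ((List.range maxlen).foldl
      (fun hs p => (E.foldl (bStep n p) (PySem.Dict.empty, hs)).2) []).Perm
      (pairsAux (bCell n) E) := by
    rw [hhits1]
    refine List.Perm.trans (flatMap_perm_congr _
      (fun p => pairsAux (bF n p) (E.filter (fun e => decide (p < e.2.length)))) _ ?_) ?_
    · intro p _
      exact (fun h => by simpa [pairsAux] using h) (goPairs_perm (bF n p) (E.filter (fun e => decide (p < e.2.length))) [])
    · have heq : ∀ p : Nat, pairsAux (bF n p) (E.filter (fun e => decide (p < e.2.length)))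
          = pairsAux (fun x y => if (decide (p < x.2.length) = true ∧ decide (p < y.2.length) = true)
              then bF n p x y else []) E :=
        fun p => pairsAux_filter _ _ E
      simp only [heq]
      refine List.Perm.trans (flatMap_pairsAux_perm _ (List.range maxlen) E) ?_
      have hcoll : ∀ x ∈ E, ∀ y ∈ E,
          (List.range maxlen).flatMap (fun p =>
            if (decide (p < x.2.length) = true ∧ decide (p < y.2.length) = true) then bF n p x y else [])
          = bCell n x y := by
        intro x hx y _
        apply bCollapse
        obtain ⟨k, hk, hx'⟩ := (PySem.List.mem_enumerate_iff _ _ _).mp hx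
        have hmem : x.2 ∈ idlist.map String.toList := by
          rw [hx']
          exact List.getElem_mem hk
        exact bMaxlen_ge _ _ hmem
      exact List.Perm.of_eq (pairsAux_congr _ _ _ hcoll)
  have hsorted : PySem.List.sorted ((List.range maxlen).foldl
      (fun hs p => (E.foldl (bStep n p) (PySem.Dict.empty, hs)).2) []) (fun h => h.1) false
      = pairsAux (bCell n) E :=
    PySem.List.sorted_eq_of_perm_of_pairwise_lt _ _ (fun h => h.1) hperm.symm
      (pairsAux_keys_pairwise idlist)
  rw [hsorted, join_nil_flatten]
  congr 1

lemma pairsAux_flatMap {α β γ : Type} (G : α → α → List β) (f : β → List γ) (l : List α) :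
    (pairsAux G l).flatMap f = pairsAux (fun x y => (G x y).flatMap f) l := by
  induction l with
  | nil => rfl
  | cons x rest ih =>
    rw [pairsAux, List.flatMap_append, ih, pairsAux]
    congr 1
    rw [List.flatMap_assoc]

-- ===== VERDICT (by name: the statement is the Claim_ definition above) =====
theorem findidenticalids_spec : Claim_equal_findidenticalids := by
  intro idlist _
  unfold Spec_findidenticalids
  rw [a_shape, b_shape]
  congr 1
  have hcell : (fun (x y : Int × List Char) => (bCell (idlist.length : Int) x y).flatMap (fun e => e.2))
      = fun x y => aContrib x.2 y.2 := by
    funext x y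
    rw [aContrib_eq]
    unfold bCell
    split <;> simp
  rw [pairsAux_flatMap, hcell, pairsAux_enumerate (fun a b => aContrib a b) (idlist.map String.toList) 0,
    pairsAux_map]
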